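-- pv_equiv track=rewrite | github.com/MichaelChristenson/MoP_Possessed | MoP_test/possessed_game/simple_gen.py | slip
-- ===== SOURCE A (Python) =====
-- def slip(roster, target, designate):
--     if type(target)==list:
--         temp = roster
--         for i in range(len(target)):
--             temp = slip(temp, target[i], designate[i])
--         return temp
--     else:
--         return '!'.join(roster).replace(target, designate).split('!')
-- ===== SOURCE B (Python) =====
-- def slip(roster, target, designate):
--     if type(target) == list:
--         if not target:
--             return roster
--         s = '!'.join(roster)
--         for t, d in zip(target, designate):
--             s = s.replace(t, d)
--         return s.split('!')
--     else:
--         return '!'.join(roster).replace(target, designate).split('!')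
-- ===== Notes on version B (the rewrite author's own statement) =====
-- stated objective: simpler
-- what changed: B joins the roster into one string once, folds over the zipped (target, designate) pairs applying each replacement to that single string, and splits once at the end, instead of A's recursion over target indices that rejoins/replaces/resplits the whole list at every step (valid because '!'.join(x.split('!')) == x); the empty target list returns the roster untouched as A does.
import Mathlib
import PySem

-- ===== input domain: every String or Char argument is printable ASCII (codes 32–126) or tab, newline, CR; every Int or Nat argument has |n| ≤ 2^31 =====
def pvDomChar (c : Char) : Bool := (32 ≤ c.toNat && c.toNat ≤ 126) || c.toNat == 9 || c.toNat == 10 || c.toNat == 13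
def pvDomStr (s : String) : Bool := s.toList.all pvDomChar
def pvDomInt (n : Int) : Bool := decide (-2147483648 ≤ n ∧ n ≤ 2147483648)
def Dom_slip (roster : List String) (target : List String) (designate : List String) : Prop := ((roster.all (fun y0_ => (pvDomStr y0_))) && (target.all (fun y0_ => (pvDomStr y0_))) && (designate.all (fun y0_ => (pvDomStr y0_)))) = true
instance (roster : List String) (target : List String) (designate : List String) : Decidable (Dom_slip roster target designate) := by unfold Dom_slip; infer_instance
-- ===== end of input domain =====

-- B joins the roster into one string once, folds the replacements over the zipped
-- (target, designate) pairs on that single string, and splits once at the end, instead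
-- of A's per-step rejoin/replace/resplit round trip; return value only.

-- ===== PORT A =====
-- A recurses over the target list; each recursive call hits the scalar branch
-- '!'.join(temp).replace(target[i], designate[i]).split('!').  Under the List String
-- typing that recursion is exactly this fold over range(len(target)).
-- '.split("!")' has the non-empty literal separator "!", so split? is always some;
-- '.getD []' only discharges the Option and never fires.
-- designate[i] can raise IndexError (designate shorter than target): excluded by Pre_slip;
-- the '.getD ""' there never fires inside Pre_slip.
def slip (roster : List String) (target : List String) (designate : List String) : List String :=
  (PySem.List.pyRange 0 target.length 1).foldl
    (fun temp i =>
      (PySem.Str.split?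
        (PySem.Str.replace (PySem.Str.join "!" temp)
          ((PySem.List.pyGet? target i).getD "")
          ((PySem.List.pyGet? designate i).getD "")) "!").getD [])
    roster

-- ===== PORT B =====
def slip_alt (roster : List String) (target : List String) (designate : List String) : List String :=
  if target.isEmpty then roster
  else
    (PySem.Str.split?
      ((target.zip designate).foldl
        (fun s p => PySem.Str.replace s p.1 p.2)
        (PySem.Str.join "!" roster)) "!").getD []

-- ===== PRECONDITION & SPEC =====
-- Pre_ excludes exactly the inputs where Python A raises IndexError (designate shorter
-- than target); Python B's zip would truncate there instead, so those inputs are out.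
def Pre_slip (roster : List String) (target : List String) (designate : List String) : Prop :=
  target.length ≤ designate.length
instance (roster : List String) (target : List String) (designate : List String) : Decidable (Pre_slip roster target designate) := by unfold Pre_slip; infer_instance
def pvWitness_slip : List String × List String × List String := (["ann", "bob!"], ["b"], ["z"])
def Spec_slip (roster : List String) (target : List String) (designate : List String) (out : List String) : Prop := out = slip_alt roster target designate
instance (roster : List String) (target : List String) (designate : List String) (out : List String) : Decidable (Spec_slip roster target designate out) := by unfold Spec_slip; infer_instance

-- ===== CLAIM (what is proved, stated in full; the proofs are below) =====
def Claim_equal_slip : Prop := ∀ (roster : List String) (target : List String) (designate : List String), Dom_slip roster target designate → Pre_slip roster target designate → Spec_slip roster target designate (slip roster target designate)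

-- ===== LEMMAS AND PROOFS =====

theorem splitOn_go_acc (sep : List Char) (fuel : Nat) (l cur : List Char)
    (acc : List (List Char)) :
    PySem.Chars.splitOn.go sep fuel l cur acc
      = acc.reverse ++ PySem.Chars.splitOn.go sep fuel l cur [] := by
  induction fuel generalizing l cur acc with
  | zero => simp [PySem.Chars.splitOn.go]
  | succ n ih =>
    cases l with
    | nil => simp [PySem.Chars.splitOn.go]
    | cons c rest =>
      simp only [PySem.Chars.splitOn.go]
      split_ifs with h
      · rw [ih _ _ (cur.reverse :: acc), ih _ _ [cur.reverse]]
        simp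
      · exact ih _ _ _

theorem splitOn_go_ne_nil (sep : List Char) (fuel : Nat) (l cur : List Char)
    (acc : List (List Char)) : PySem.Chars.splitOn.go sep fuel l cur acc ≠ [] := by
  induction fuel generalizing l cur acc with
  | zero => simp [PySem.Chars.splitOn.go]
  | succ n ih =>
    cases l with
    | nil => simp [PySem.Chars.splitOn.go]
    | cons c rest =>
      simp only [PySem.Chars.splitOn.go]
      split_ifs
      · exact ih _ _ _
      · exact ih _ _ _

theorem intercalate_cons_of_ne_nil (sep a : List Char) (ps : List (List Char))
    (h : ps ≠ []) : sep.intercalate (a :: ps) = a ++ sep ++ sep.intercalate ps := by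
  cases ps with
  | nil => exact absurd rfl h
  | cons b qs => simp [List.intercalate, List.intersperse]

theorem join_splitOn_go (sep : List Char) (hsep : sep ≠ []) (fuel : Nat)
    (l cur : List Char) (hl : l.length ≤ fuel) :
    PySem.Chars.join sep (PySem.Chars.splitOn.go sep fuel l cur []) = cur.reverse ++ l := by
  induction fuel generalizing l cur with
  | zero =>
    have : l = [] := List.length_eq_zero_iff.mp (Nat.le_zero.mp hl)
    subst this
    simp [PySem.Chars.splitOn.go, PySem.Chars.join, List.intercalate]
  | succ n ih =>
    cases l with
    | nil => simp [PySem.Chars.splitOn.go, PySem.Chars.join, List.intercalate]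
    | cons c rest =>
      simp only [PySem.Chars.splitOn.go]
      split_ifs with h
      · rw [splitOn_go_acc sep n _ _ [cur.reverse]]
        obtain ⟨t, ht⟩ := List.isPrefixOf_iff_prefix.mp h
        have hdrop : (c :: rest).drop sep.length = t := by
          rw [← ht, List.drop_left]
        have hs1 : 1 ≤ sep.length := by
          cases sep with
          | nil => exact absurd rfl hsep
          | cons a s => simp
        have hlen : t.length ≤ n := by
          have hsum : sep.length + t.length = (c :: rest).length := by
            rw [← ht]; simp
          simp only [List.length_cons] at hsum hl
          omega
        rw [hdrop]
        simp only [List.reverse_cons, List.reverse_nil, List.nil_append,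
          List.singleton_append]
        rw [PySem.Chars.join,
          intercalate_cons_of_ne_nil sep cur.reverse _ (splitOn_go_ne_nil sep n t [] []),
          ← PySem.Chars.join, ih t [] hlen]
        simp only [List.reverse_nil, List.nil_append, List.append_assoc]
        rw [← ht]
      · have := ih rest (c :: cur) (by simp only [List.length_cons] at hl; omega)
        rw [this]
        simp

theorem join_splitOn (sep cs : List Char) (hsep : sep ≠ []) :
    PySem.Chars.join sep (PySem.Chars.splitOn cs sep) = cs := by
  have := join_splitOn_go sep hsep (cs.length + 1) cs [] (by omega)
  simpa [PySem.Chars.splitOn] using this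

-- String-level round trip: '!'.join(s.split('!')) = s
theorem join_split_str (s : String) :
    PySem.Str.join "!" ((PySem.Str.split? s "!").getD []) = s := by
  simp only [PySem.Str.split?, PySem.Chars.split?, PySem.Str.join]
  rw [if_neg (by decide : ¬(List.isEmpty ("!".toList) = true))]
  simp only [Option.map_some, Option.getD_some, List.map_map]
  have hc : (String.toList ∘ String.ofList) = id := by
    funext x; simp [Function.comp]
  rw [hc, List.map_id, join_splitOn _ _ (by decide)]
  simp

-- A's per-step rejoin/resplit commutes out to one split at the end.
theorem foldl_split_comm (idxs : List Int) (f : String → Int → String) (s : String) :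
    idxs.foldl (fun temp i => (PySem.Str.split? (f (PySem.Str.join "!" temp) i) "!").getD [])
        ((PySem.Str.split? s "!").getD [])
      = (PySem.Str.split? (idxs.foldl f s) "!").getD [] := by
  induction idxs generalizing s with
  | nil => rfl
  | cons i rest ih =>
    simp only [List.foldl_cons]
    rw [join_split_str s]
    exact ih (f s i)

-- The index fold over range(len(target)) equals the fold over the zipped pairs.
theorem range_foldl_eq_zip_foldl (ts ds : List String) (h : ts.length ≤ ds.length) :
    ∀ (m a : Nat), ts.length - a = m → ∀ (s : String),
    (PySem.List.pyRange a ts.length 1).foldl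
        (fun s i => PySem.Str.replace s ((PySem.List.pyGet? ts i).getD "")
          ((PySem.List.pyGet? ds i).getD "")) s
      = ((ts.drop a).zip (ds.drop a)).foldl (fun s p => PySem.Str.replace s p.1 p.2) s := by
  intro m
  induction m with
  | zero =>
    intro a ha s
    have ha' : ts.length ≤ a := by omega
    rw [PySem.List.pyRange_one_eq_nil (by exact_mod_cast ha'),
      List.drop_eq_nil_of_le ha']
    simp
  | succ n ih =>
    intro a ha s
    have hat : a < ts.length := by omega
    have had : a < ds.length := by omega
    rw [PySem.List.pyRange_one_cons (by exact_mod_cast hat)]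
    simp only [List.foldl_cons]
    rw [List.drop_eq_getElem_cons hat, List.drop_eq_getElem_cons had]
    simp only [List.zip_cons_cons, List.foldl_cons]
    have h1 : PySem.List.pyGet? ts (a : Int) = some ts[a] := by
      simp [PySem.List.pyGet?_natCast, List.getElem?_eq_getElem hat]
    have h2 : PySem.List.pyGet? ds (a : Int) = some ds[a] := by
      simp [PySem.List.pyGet?_natCast, List.getElem?_eq_getElem had]
    rw [h1, h2]
    have := ih (a + 1) (by omega) (PySem.Str.replace s ts[a] ds[a])
    simpa using this

-- ===== VERDICT (by name: the statement is the Claim_ definition above) =====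
theorem slip_spec : Claim_equal_slip := by
  intro roster target designate _ hpre
  unfold Spec_slip slip slip_alt
  by_cases h : target.isEmpty
  · have : target.length = 0 := by simpa [List.isEmpty_iff_length_eq_zero] using h
    simp [h, this, PySem.List.pyRange]
  · simp only [h]
    have hlen : target.length ≠ 0 := by
      simpa [List.isEmpty_iff_length_eq_zero] using h
    have hpos : (0 : Int) < target.length := by
      exact_mod_cast Nat.pos_of_ne_zero hlen
    rw [PySem.List.pyRange_one_cons hpos]
    simp only [List.foldl_cons]
    set f : String → Int → String := fun s i =>
      PySem.Str.replace s ((PySem.List.pyGet? target i).getD "")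
        ((PySem.List.pyGet? designate i).getD "") with hf
    have h0 :
        (PySem.Str.split? (PySem.Str.replace (PySem.Str.join "!" roster)
            ((PySem.List.pyGet? target 0).getD "")
            ((PySem.List.pyGet? designate 0).getD "")) "!").getD []
          = (PySem.Str.split? (f (PySem.Str.join "!" roster) 0) "!").getD [] := rfl
    rw [h0, foldl_split_comm _ f (f (PySem.Str.join "!" roster) 0)]
    have hmain := range_foldl_eq_zip_foldl target designate hpre
      target.length 0 (by omega) (PySem.Str.join "!" roster)
    simp only [List.drop_zero] at hmain
    rw [← hf] at hmain
    norm_num at hmain ⊢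
    -- rebuild the cons step of A's fold into the full range fold
    have hstep : (PySem.List.pyRange 1 (target.length : Int) 1).foldl f
          (f (PySem.Str.join "!" roster) 0)
        = (PySem.List.pyRange 0 (target.length : Int) 1).foldl f (PySem.Str.join "!" roster) := by
      rw [PySem.List.pyRange_one_cons hpos]
      norm_num
    rw [hstep, hmain]
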